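-- pv_equiv track=rewrite | github.com/ooblog/LTsv10kanedit | LTsv/LTsv_file.py | LTsv_unziplabel
-- ===== SOURCE A (Python) =====
-- def LTsv_joindatanum(LTsv_line,LTsv_datanum,LTsv_default=None):
--     LTsv_data="" if LTsv_default is None else LTsv_default.replace('\n','\t')
--     if len(LTsv_data) > 0:
--         if not LTsv_data.startswith('\t'):
--             LTsv_data='\t'+LTsv_data
--     LTsv_datadeno=0; LTsv_splits=LTsv_line.replace('\n','\t').split('\t'); LTsv_join=""
--     if LTsv_datanum < 0:
--         LTsv_join+=LTsv_data
--     for LTsv_split in LTsv_splits: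
--         if len(LTsv_split) > 0:
--             if LTsv_datanum == LTsv_datadeno:
--                 LTsv_join+=LTsv_data
--             LTsv_join+='\t'+LTsv_split
--             LTsv_datadeno+=1
--     if LTsv_datadeno <= LTsv_datanum:
--         LTsv_join+=LTsv_data
--     return LTsv_join.strip('\t')
--
-- def LTsv_unziplabel(LTsv_line):
--     LTsv_labels=""
--     LTsv_splitlabels=LTsv_joindatanum(LTsv_line,0,"").strip('\n').split('\t')
--     for LTsv_split in LTsv_splitlabels:
--         if len(LTsv_split) > 0:
--             LTsv_posL=LTsv_split.find(':')
--             if LTsv_posL > 0: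
--                 LTsv_label=LTsv_split[:LTsv_posL]
--                 if len(LTsv_label) > 0:
--                     LTsv_labels+=LTsv_label+'\t'
--     return LTsv_labels.rstrip('\t')
-- ===== SOURCE B (Python) =====
-- def LTsv_unziplabel(LTsv_line):
--     return '\t'.join(t.split(':', 1)[0]
--                      for t in LTsv_line.replace('\n', '\t').split('\t')
--                      if ':' in t and not t.startswith(':'))
-- ===== Notes on version B (the rewrite author's own statement) =====
-- stated objective: idiomatic
-- what changed: Replaces A's joindatanum rejoin/re-split decomposition and its two accumulator loops with trailing-separator stripping by a single split -> filter -> map -> join pipeline over the tokens.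
import Mathlib
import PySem

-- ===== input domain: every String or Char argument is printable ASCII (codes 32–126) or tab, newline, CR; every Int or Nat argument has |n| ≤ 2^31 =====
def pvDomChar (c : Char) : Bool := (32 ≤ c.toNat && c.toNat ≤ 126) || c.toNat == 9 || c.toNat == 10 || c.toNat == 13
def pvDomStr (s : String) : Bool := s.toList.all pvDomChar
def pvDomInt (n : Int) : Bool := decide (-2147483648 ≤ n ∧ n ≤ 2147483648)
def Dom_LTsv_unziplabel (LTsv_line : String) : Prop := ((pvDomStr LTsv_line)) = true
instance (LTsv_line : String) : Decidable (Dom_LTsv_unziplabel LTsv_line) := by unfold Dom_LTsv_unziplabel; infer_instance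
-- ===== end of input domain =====

-- B replaces A's joindatanum rejoin/re-split plus two accumulator loops (with trailing-separator
-- stripping) by a single split → filter → map → join pipeline over the tokens (objective: idiomatic).

-- ===== PORT A =====
-- s.rstrip('\t') ported by hand (PySem has no one-sided stripChars): drop trailing tabs; exact for this call.
def rstripTab (s : List Char) : List Char := (s.reverse.dropWhile (fun c => c == '\t')).reverse

-- literal transliteration of LTsv_joindatanum, over List Char
def LTsv_joindatanumChars (LTsv_line : List Char) (LTsv_datanum : Int) (LTsv_default : Option (List Char)) : List Char :=
  let data0 : List Char := match LTsv_default with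
    | none => []
    | some d => PySem.Chars.replace d ['\n'] ['\t']
  let data : List Char :=
    if 0 < data0.length then
      (if PySem.Chars.startswith data0 ['\t'] = false then '\t' :: data0 else data0)
    else data0
  let splits := PySem.Chars.splitOn (PySem.Chars.replace LTsv_line ['\n'] ['\t']) ['\t']
  let join0 : List Char := if LTsv_datanum < 0 then [] ++ data else []
  let st := splits.foldl (fun (st : Int × List Char) sp =>
      if 0 < sp.length then
        (st.1 + 1, (if LTsv_datanum == st.1 then st.2 ++ data else st.2) ++ '\t' :: sp)
      else st) (0, join0)
  let join1 := if st.1 ≤ LTsv_datanum then st.2 ++ data else st.2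
  PySem.Chars.stripChars join1 ['\t']

def LTsv_unziplabelChars (LTsv_line : List Char) : List Char :=
  let splitlabels := PySem.Chars.splitOn
      (PySem.Chars.stripChars (LTsv_joindatanumChars LTsv_line 0 (some [])) ['\n']) ['\t']
  let labels := splitlabels.foldl (fun acc sp =>
      if 0 < sp.length then
        let posL := PySem.Chars.find sp [':']
        if 0 < posL then
          let label := PySem.Chars.slice sp none (some posL)
          if 0 < label.length then acc ++ label ++ ['\t'] else acc
        else acc
      else acc) []
  rstripTab labels

def LTsv_unziplabel (LTsv_line : String) : String :=
  String.ofList (LTsv_unziplabelChars LTsv_line.toList)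

-- ===== PORT B =====
def LTsv_unziplabel_altChars (LTsv_line : List Char) : List Char :=
  PySem.Chars.join ['\t']
    (((PySem.Chars.splitOn (PySem.Chars.replace LTsv_line ['\n'] ['\t']) ['\t']).filter
        (fun t => PySem.Chars.isIn [':'] t && !PySem.Chars.startswith t [':'])).map
      (fun t => (PySem.Chars.splitOnMax t [':'] 1).headD []))

def LTsv_unziplabel_alt (LTsv_line : String) : String :=
  String.ofList (LTsv_unziplabel_altChars LTsv_line.toList)

-- ===== PRECONDITION & SPEC =====
def Spec_LTsv_unziplabel (LTsv_line : String) (out : String) : Prop := out = LTsv_unziplabel_alt LTsv_line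
instance (LTsv_line : String) (out : String) : Decidable (Spec_LTsv_unziplabel LTsv_line out) := by unfold Spec_LTsv_unziplabel; infer_instance

-- ===== CLAIM (what is proved, stated in full; the proofs are below) =====
def Claim_equal_LTsv_unziplabel : Prop := ∀ (LTsv_line : String), Dom_LTsv_unziplabel LTsv_line → Spec_LTsv_unziplabel LTsv_line (LTsv_unziplabel LTsv_line)

-- ===== LEMMAS AND PROOFS =====

-- structural single-character splitter; splitOn with a one-character separator computes it
def sp (a : Char) : List Char → List (List Char)
  | [] => [[]]
  | c :: rest => if c = a then [] :: sp a rest else (sp a rest).modifyHead (c :: ·)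

theorem sp_ne_nil (a : Char) (s : List Char) : sp a s ≠ [] := by
  induction s with
  | nil => simp [sp]
  | cons c rest ih =>
    simp only [sp]
    split
    · simp
    · intro h; exact ih (by simpa using congrArg List.length h)

theorem splitOn_go_eq (a : Char) : ∀ (fuel : Nat) (l cur : List Char) (acc : List (List Char)),
    l.length < fuel →
    PySem.Chars.splitOn.go [a] fuel l cur acc
      = acc.reverse ++ ((sp a l).modifyHead (cur.reverse ++ ·)) := by
  intro fuel
  induction fuel with
  | zero => intro l cur acc h; omega
  | succ f ih =>
    intro l cur acc h
    cases l with
    | nil => simp [PySem.Chars.splitOn.go, sp]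
    | cons c rest =>
      obtain ⟨hd, tl, hsp⟩ := List.exists_cons_of_ne_nil (sp_ne_nil a rest)
      by_cases hc : c = a
      · subst hc
        rw [show PySem.Chars.splitOn.go [c] (f+1) (c :: rest) cur acc
            = PySem.Chars.splitOn.go [c] f (List.drop 1 (c :: rest)) [] (cur.reverse :: acc) by
          simp [PySem.Chars.splitOn.go, List.isPrefixOf]]
        rw [ih _ _ _ (by simpa using Nat.lt_of_succ_lt_succ h)]
        simp [sp, hsp]
      · rw [show PySem.Chars.splitOn.go [a] (f+1) (c :: rest) cur acc
            = PySem.Chars.splitOn.go [a] f rest (c :: cur) acc by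
          simp [PySem.Chars.splitOn.go, List.isPrefixOf, beq_false_of_ne (Ne.symm hc)]]
        rw [ih _ _ _ (by simpa using Nat.lt_of_succ_lt_succ h)]
        simp [sp, hc, hsp]

theorem splitOn_eq_sp (a : Char) (s : List Char) : PySem.Chars.splitOn s [a] = sp a s := by
  obtain ⟨hd, tl, hsp⟩ := List.exists_cons_of_ne_nil (sp_ne_nil a s)
  rw [PySem.Chars.splitOn, splitOn_go_eq a _ _ _ _ (by omega)]
  simp [hsp]

theorem sp_sound (a : Char) : ∀ (s : List Char), ∀ t ∈ sp a s, ∀ c ∈ t, c ∈ s ∧ c ≠ a := by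
  intro s
  induction s with
  | nil => intro t ht c hc; simp [sp] at ht; subst ht; simp at hc
  | cons d rest ih =>
    intro t ht c hc
    by_cases hd : d = a
    · subst hd
      simp [sp] at ht
      rcases ht with h | h
      · subst h; simp at hc
      · have := ih t h c hc; exact ⟨List.mem_cons_of_mem _ this.1, this.2⟩
    · obtain ⟨hd0, tl, hsp⟩ := List.exists_cons_of_ne_nil (sp_ne_nil a rest)
      simp [sp, hd, hsp] at ht
      rcases ht with h | h
      · subst h
        rcases List.mem_cons.mp hc with h | h
        · subst h; exact ⟨List.mem_cons_self, hd⟩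
        · have := ih hd0 (by simp [hsp]) c h
          exact ⟨List.mem_cons_of_mem _ this.1, this.2⟩
      · have := ih t (by simp [hsp, h]) c hc
        exact ⟨List.mem_cons_of_mem _ this.1, this.2⟩

theorem sp_no_sep (a : Char) : ∀ (p : List Char), a ∉ p → sp a p = [p] := by
  intro p
  induction p with
  | nil => intro _; rfl
  | cons c rest ih =>
    intro h
    have hc : c ≠ a := fun hca => h (hca ▸ List.mem_cons_self)
    simp [sp, hc, ih (fun hm => h (List.mem_cons_of_mem _ hm))]

theorem sp_append_sep (a : Char) (rest : List Char) : ∀ (p : List Char), a ∉ p →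
    sp a (p ++ a :: rest) = p :: sp a rest := by
  intro p
  induction p with
  | nil => intro _; simp [sp]
  | cons c q ih =>
    intro h
    have hc : c ≠ a := fun hca => h (hca ▸ List.mem_cons_self)
    simp only [List.cons_append, sp, if_neg hc, ih (fun hm => h (List.mem_cons_of_mem _ hm))]
    rfl

theorem sp_intercalate (a : Char) : ∀ (ne : List (List Char)), ne ≠ [] →
    (∀ t ∈ ne, a ∉ t) → sp a (List.intercalate [a] ne) = ne := by
  intro ne
  induction ne with
  | nil => intro h; exact absurd rfl h
  | cons t rs ih =>
    intro _ h
    cases rs with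
    | nil => simp [List.intercalate, sp_no_sep a t (h t List.mem_cons_self)]
    | cons u rs' =>
      have : List.intercalate [a] (t :: u :: rs') = t ++ a :: List.intercalate [a] (u :: rs') := by
        simp [List.intercalate]
      rw [this, sp_append_sep a _ t (h t List.mem_cons_self),
        ih (by simp) (fun v hv => h v (List.mem_cons_of_mem _ hv))]

theorem replace_go_single (a b : Char) : ∀ (fuel : Nat) (l acc : List Char), l.length ≤ fuel →
    PySem.Chars.replace.go [a] [b] fuel l acc
      = acc.reverse ++ l.map (fun c => if c = a then b else c) := by
  intro fuel
  induction fuel with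
  | zero =>
    intro l acc h
    have : l = [] := List.length_eq_zero_iff.mp (Nat.le_zero.mp h)
    subst this; simp [PySem.Chars.replace.go]
  | succ f ih =>
    intro l acc h
    cases l with
    | nil => simp [PySem.Chars.replace.go]
    | cons c t =>
      by_cases hc : c = a
      · subst hc
        rw [show PySem.Chars.replace.go [c] [b] (f+1) (c :: t) acc
            = PySem.Chars.replace.go [c] [b] f (List.drop 1 (c :: t)) ([b].reverse ++ acc) by
          simp [PySem.Chars.replace.go, List.isPrefixOf]]
        rw [ih _ _ (by simpa using h)]
        simp
      · rw [show PySem.Chars.replace.go [a] [b] (f+1) (c :: t) acc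
            = PySem.Chars.replace.go [a] [b] f t (c :: acc) by
          simp [PySem.Chars.replace.go, List.isPrefixOf, beq_false_of_ne (Ne.symm hc)]]
        rw [ih _ _ (by simpa using h)]
        simp [hc]

theorem replace_single (a b : Char) (s : List Char) :
    PySem.Chars.replace s [a] [b] = s.map (fun c => if c = a then b else c) := by
  rw [PySem.Chars.replace, if_neg (by simp)]
  simpa using replace_go_single a b s.length s [] (le_refl _)

theorem find_go_single (a : Char) : ∀ (l : List Char) (n : Nat),
    PySem.Chars.find.go [a] l n
      = if a ∈ l then ((n : Int) + ((l.takeWhile (fun c => !(c == a))).length : Int)) else -1 := by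
  intro l
  induction l with
  | nil => intro n; simp [PySem.Chars.find.go]
  | cons c t ih =>
    intro n
    by_cases hc : c = a
    · subst hc
      simp [PySem.Chars.find.go, List.isPrefixOf, List.takeWhile]
    · rw [show PySem.Chars.find.go [a] (c :: t) n = PySem.Chars.find.go [a] t (n+1) by
        simp [PySem.Chars.find.go, List.isPrefixOf, beq_false_of_ne (Ne.symm hc)]]
      rw [ih]
      rw [show List.takeWhile (fun c => !(c == a)) (c :: t)
          = c :: List.takeWhile (fun c => !(c == a)) t by
        simp [List.takeWhile, beq_false_of_ne hc]]
      by_cases hm : a ∈ t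
      · rw [if_pos hm, if_pos (List.mem_cons_of_mem _ hm)]
        simp only [List.length_cons]
        push_cast; ring
      · rw [if_neg hm, if_neg (by simp [hm, Ne.symm hc])]

theorem find_single (a : Char) (l : List Char) :
    PySem.Chars.find l [a] = if a ∈ l then (((l.takeWhile (fun c => !(c == a))).length : Int)) else -1 := by
  rw [PySem.Chars.find, find_go_single]
  simp

theorem soMax_go_zero (a : Char) : ∀ (fuel : Nat) (l : List Char) (acc : List (List Char)),
    PySem.Chars.splitOnMax.go [a] fuel 0 l [] acc = acc.reverse ++ [l] := by
  intro fuel l acc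
  cases fuel with
  | zero => simp [PySem.Chars.splitOnMax.go]
  | succ f => cases l <;> simp [PySem.Chars.splitOnMax.go]

theorem soMax_go_one (a : Char) : ∀ (fuel : Nat) (l cur : List Char), l.length < fuel →
    ∃ rest, PySem.Chars.splitOnMax.go [a] fuel 1 l cur []
      = (cur.reverse ++ l.takeWhile (fun c => !(c == a))) :: rest := by
  intro fuel
  induction fuel with
  | zero => intro l cur h; omega
  | succ f ih =>
    intro l cur h
    cases l with
    | nil => exact ⟨[], by simp [PySem.Chars.splitOnMax.go]⟩
    | cons c t =>
      by_cases hc : c = a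
      · subst hc
        refine ⟨[t], ?_⟩
        rw [show PySem.Chars.splitOnMax.go [c] (f+1) 1 (c :: t) cur []
            = PySem.Chars.splitOnMax.go [c] f 0 (List.drop 1 (c :: t)) [] [cur.reverse] by
          simp [PySem.Chars.splitOnMax.go, List.isPrefixOf]]
        rw [soMax_go_zero]
        simp [List.takeWhile]
      · obtain ⟨rest, hr⟩ := ih t (c :: cur) (by simpa using Nat.lt_of_succ_lt_succ h)
        refine ⟨rest, ?_⟩
        rw [show PySem.Chars.splitOnMax.go [a] (f+1) 1 (c :: t) cur []
            = PySem.Chars.splitOnMax.go [a] f 1 t (c :: cur) [] by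
          simp [PySem.Chars.splitOnMax.go, List.isPrefixOf, beq_false_of_ne (Ne.symm hc)]]
        rw [hr]
        simp [List.takeWhile, beq_false_of_ne hc]

theorem headD_splitOnMax_one (a : Char) (t : List Char) :
    (PySem.Chars.splitOnMax t [a] 1).headD [] = t.takeWhile (fun c => !(c == a)) := by
  rw [PySem.Chars.splitOnMax, if_neg (by omega)]
  obtain ⟨rest, hr⟩ := soMax_go_one a (t.length + 1) t [] (by omega)
  simp only [Int.toNat_one]
  rw [hr]
  simp

theorem dropWhile_eq_self_of_head (p : Char → Bool) (l : List Char)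
    (h : ∀ c, l.head? = some c → p c = false) : l.dropWhile p = l := by
  cases l with
  | nil => rfl
  | cons c rest => simp [List.dropWhile, h c rfl]

theorem stripChars_not_mem (a : Char) (p : List Char) (h : a ∉ p) :
    PySem.Chars.stripChars p [a] = p := by
  rw [PySem.Chars.stripChars]
  have h1 : ∀ (l : List Char), a ∉ l → l.dropWhile (fun c => [a].contains c) = l := by
    intro l hl
    apply dropWhile_eq_self_of_head
    intro c hc
    have : c ∈ l := List.mem_of_mem_head? hc
    simp only [List.contains_cons, List.contains_nil, Bool.or_false]
    exact beq_false_of_ne (fun he => hl (he ▸ this))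
  rw [h1 p h, h1 p.reverse (by simpa using h), List.reverse_reverse]

theorem cons_flatMap_intercalate (a : Char) : ∀ (rs : List (List Char)) (t : List Char),
    t ++ rs.flatMap (fun u => a :: u) = List.intercalate [a] (t :: rs) := by
  intro rs
  induction rs with
  | nil => intro t; simp [List.intercalate]
  | cons u rs' ih =>
    intro t
    rw [show List.intercalate [a] (t :: u :: rs') = t ++ a :: List.intercalate [a] (u :: rs') by
      simp [List.intercalate]]
    rw [List.flatMap_cons, ← ih u]
    simp

theorem flatMap_append_intercalate (a : Char) : ∀ (L : List (List Char)), L ≠ [] →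
    L.flatMap (fun u => u ++ [a]) = List.intercalate [a] L ++ [a] := by
  intro L
  induction L with
  | nil => intro h; exact absurd rfl h
  | cons t rs ih =>
    intro _
    cases rs with
    | nil => simp [List.intercalate]
    | cons u rs' =>
      rw [show List.intercalate [a] (t :: u :: rs') = t ++ a :: List.intercalate [a] (u :: rs') by
        simp [List.intercalate]]
      rw [List.flatMap_cons, ih (by simp)]
      simp

theorem head?_intercalate (a : Char) (t : List Char) (rs : List (List Char)) (ht : t ≠ []) :
    (List.intercalate [a] (t :: rs)).head? = t.head? := by
  cases rs with
  | nil => simp [List.intercalate]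
  | cons u rs' =>
    rw [show List.intercalate [a] (t :: u :: rs') = t ++ a :: List.intercalate [a] (u :: rs') by
      simp [List.intercalate]]
    exact List.head?_append_of_ne_nil _ ht

theorem getLast?_intercalate_ne (a : Char) : ∀ (rs : List (List Char)) (t : List Char),
    t ≠ [] → a ∉ t → (∀ u ∈ rs, u ≠ [] ∧ a ∉ u) →
    ∀ c, (List.intercalate [a] (t :: rs)).getLast? = some c → c ≠ a := by
  intro rs
  induction rs with
  | nil =>
    intro t ht hat _ c hc
    rw [show List.intercalate [a] [t] = t by simp [List.intercalate]] at hc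
    exact fun he => hat (he ▸ List.mem_of_getLast? hc)
  | cons u rs' ih =>
    intro t ht hat hrs c hc
    rw [show List.intercalate [a] (t :: u :: rs') = t ++ a :: List.intercalate [a] (u :: rs') by
      simp [List.intercalate]] at hc
    have hu := hrs u List.mem_cons_self
    have hne : List.intercalate [a] (u :: rs') ≠ [] := by
      intro he
      have := head?_intercalate a u rs' hu.1
      rw [he] at this
      exact hu.1 (List.head?_eq_none_iff.mp this.symm)
    rw [List.getLast?_append] at hc
    rw [show (a :: List.intercalate [a] (u :: rs')).getLast? = (List.intercalate [a] (u :: rs')).getLast? by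
      rw [show a :: List.intercalate [a] (u :: rs') = [a] ++ List.intercalate [a] (u :: rs') from rfl,
        List.getLast?_append]
      cases hg : (List.intercalate [a] (u :: rs')).getLast? with
      | none => exact absurd (List.getLast?_eq_none_iff.mp hg) hne
      | some d => simp] at hc
    cases hg : (List.intercalate [a] (u :: rs')).getLast? with
    | none => exact absurd (List.getLast?_eq_none_iff.mp hg) hne
    | some d =>
      rw [hg] at hc
      simp only [Option.some_or] at hc
      have hd := ih u hu.1 hu.2 (fun v hv => hrs v (List.mem_cons_of_mem _ hv)) d hg
      exact (Option.some_inj.mp hc) ▸ hd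

theorem mem_intercalate (a : Char) : ∀ (ne : List (List Char)) (c : Char),
    c ∈ List.intercalate [a] ne → c = a ∨ ∃ t ∈ ne, c ∈ t := by
  intro ne
  induction ne with
  | nil => intro c hc; simp [List.intercalate] at hc
  | cons t rs ih =>
    intro c hc
    cases rs with
    | nil =>
      rw [show List.intercalate [a] [t] = t by simp [List.intercalate]] at hc
      exact Or.inr ⟨t, List.mem_cons_self, hc⟩
    | cons u rs' =>
      rw [show List.intercalate [a] (t :: u :: rs') = t ++ a :: List.intercalate [a] (u :: rs') by
        simp [List.intercalate]] at hc
      rcases List.mem_append.mp hc with h | h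
      · exact Or.inr ⟨t, List.mem_cons_self, h⟩
      · rcases List.mem_cons.mp h with h | h
        · exact Or.inl h
        · rcases ih c h with h | ⟨v, hv, hcv⟩
          · exact Or.inl h
          · exact Or.inr ⟨v, List.mem_cons_of_mem _ hv, hcv⟩

-- strip('\t') of A's joined '\t'+token string is exactly '\t'.join of the tokens
theorem strip_flatMap_eq_intercalate (ne : List (List Char)) (hne : ne ≠ [])
    (h : ∀ t ∈ ne, t ≠ [] ∧ '\t' ∉ t) :
    PySem.Chars.stripChars (ne.flatMap (fun t => '\t' :: t)) ['\t'] = List.intercalate ['\t'] ne := by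
  obtain ⟨t, rs, rfl⟩ := List.exists_cons_of_ne_nil hne
  have ht := h t List.mem_cons_self
  rw [List.flatMap_cons, show '\t' :: t ++ List.flatMap (fun t => '\t' :: t) rs
      = '\t' :: (t ++ List.flatMap (fun t => '\t' :: t) rs) from rfl,
    cons_flatMap_intercalate]
  set X := List.intercalate ['\t'] (t :: rs) with hX
  have hhead : ∀ c, X.head? = some c → (['\t'].contains c) = false := by
    intro c hc
    rw [hX, head?_intercalate _ _ _ ht.1] at hc
    have hmem : c ∈ t := List.mem_of_mem_head? hc
    simp only [List.contains_cons, List.contains_nil, Bool.or_false]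
    exact beq_false_of_ne (fun he => ht.2 (he ▸ hmem))
  have hlast : ∀ c, X.reverse.head? = some c → (['\t'].contains c) = false := by
    intro c hc
    rw [List.head?_reverse] at hc
    have := getLast?_intercalate_ne '\t' rs t ht.1 ht.2
      (fun u hu => h u (List.mem_cons_of_mem _ hu)) c hc
    simp only [List.contains_cons, List.contains_nil, Bool.or_false]
    exact beq_false_of_ne this
  rw [PySem.Chars.stripChars]
  rw [show List.dropWhile (fun c => List.contains ['\t'] c) ('\t' :: X)
      = List.dropWhile (fun c => List.contains ['\t'] c) X by simp [List.dropWhile]]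
  rw [dropWhile_eq_self_of_head _ _ hhead, dropWhile_eq_self_of_head _ _ hlast,
    List.reverse_reverse]

-- rstrip('\t') of A's label+'\t' accumulation is exactly '\t'.join of the labels
theorem rstrip_flatMap_eq_intercalate (L : List (List Char))
    (h : ∀ t ∈ L, t ≠ [] ∧ '\t' ∉ t) :
    rstripTab (L.flatMap (fun t => t ++ ['\t'])) = List.intercalate ['\t'] L := by
  cases hL : L with
  | nil => simp [rstripTab, List.intercalate]
  | cons t rs =>
    subst hL
    have ht := h t List.mem_cons_self
    rw [flatMap_append_intercalate _ _ (by simp)]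
    set X := List.intercalate ['\t'] (t :: rs) with hX
    have hlast : ∀ c, X.reverse.head? = some c → (c == '\t') = false := by
      intro c hc
      rw [List.head?_reverse] at hc
      exact beq_false_of_ne (getLast?_intercalate_ne '\t' rs t ht.1 ht.2
        (fun u hu => h u (List.mem_cons_of_mem _ hu)) c hc)
    rw [rstripTab, List.reverse_append]
    rw [show ((['\t'] : List Char).reverse ++ X.reverse) = '\t' :: X.reverse by simp]
    rw [show List.dropWhile (fun c => c == '\t') ('\t' :: X.reverse)
      = List.dropWhile (fun c => c == '\t') X.reverse by simp [List.dropWhile]]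
    rw [dropWhile_eq_self_of_head _ _ hlast, List.reverse_reverse]

-- A's joindatanum fold with empty data: collect '\t'+token for the nonempty tokens
theorem foldJ (ts : List (List Char)) : ∀ (st : Int × List Char),
    (ts.foldl (fun (st : Int × List Char) sp =>
      if 0 < sp.length then
        (st.1 + 1, (if (0:Int) == st.1 then st.2 ++ ([] : List Char) else st.2) ++ '\t' :: sp)
      else st) st).2
    = st.2 ++ (ts.filter (fun t => decide (0 < t.length))).flatMap (fun t => '\t' :: t) := by
  induction ts with
  | nil => intro st; simp
  | cons u ts ih =>
    intro st
    rw [List.foldl_cons]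
    by_cases hu : 0 < u.length
    · rw [if_pos hu, ih]
      simp [hu]
    · rw [if_neg hu, ih]
      simp [hu]

def bodyA (t : List Char) : List Char :=
  if 0 < t.length then
    if 0 < PySem.Chars.find t [':'] then
      if 0 < (PySem.Chars.slice t none (some (PySem.Chars.find t [':']))).length then
        PySem.Chars.slice t none (some (PySem.Chars.find t [':'])) ++ ['\t']
      else []
    else []
  else []

theorem foldLab (ts : List (List Char)) : ∀ (acc : List Char),
    (ts.foldl (fun acc sp =>
      if 0 < sp.length then
        let posL := PySem.Chars.find sp [':']
        if 0 < posL then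
          let label := PySem.Chars.slice sp none (some posL)
          if 0 < label.length then acc ++ label ++ ['\t'] else acc
        else acc
      else acc) acc)
    = acc ++ ts.flatMap bodyA := by
  induction ts with
  | nil => intro acc; simp
  | cons u ts ih =>
    intro acc
    rw [List.foldl_cons, ih, List.flatMap_cons, ← List.append_assoc]
    congr 1
    simp only [bodyA]
    split_ifs <;> simp

theorem bodyA_eq (t : List Char) :
    bodyA t = if (PySem.Chars.isIn [':'] t && !PySem.Chars.startswith t [':'])
      then (t.takeWhile (fun c => !(c == ':'))) ++ ['\t'] else [] := by
  by_cases hmem : ':' ∈ t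
  · cases t with
    | nil => simp at hmem
    | cons c r =>
      by_cases hc : c = ':'
      · subst hc
        have hfind : PySem.Chars.find (':' :: r) [':'] = 0 := by
          rw [find_single, if_pos hmem]
          simp [List.takeWhile]
        have hsw : PySem.Chars.startswith (':' :: r) [':'] = true := by
          simp [PySem.Chars.startswith, List.isPrefixOf]
        simp [bodyA, hfind, hsw]
      · have htw : List.takeWhile (fun c => !(c == ':')) (c :: r)
            = c :: List.takeWhile (fun c => !(c == ':')) r := by
          simp [List.takeWhile, beq_false_of_ne hc]
        have hfind : PySem.Chars.find (c :: r) [':']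
            = (((c :: r).takeWhile (fun c => !(c == ':'))).length : Int) := by
          rw [find_single, if_pos hmem]
        have hII : PySem.Chars.isIn [':'] (c :: r) = true := by
          rw [PySem.Chars.isIn, find_single, if_pos hmem]
          simp
        have hsw : PySem.Chars.startswith (c :: r) [':'] = false := by
          simp [PySem.Chars.startswith, List.isPrefixOf, beq_false_of_ne (Ne.symm hc)]
        have hslice : PySem.Chars.slice (c :: r) none (some (PySem.Chars.find (c :: r) [':']))
            = (c :: r).takeWhile (fun c => !(c == ':')) := by
          rw [hfind]
          rw [show ((((c :: r).takeWhile (fun c => !(c == ':'))).length : Nat) : Int)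
            = (((c :: r).takeWhile (fun c => !(c == ':'))).length : Int) from rfl]
          rw [PySem.Chars.slice_eq_listSlice, PySem.List.slice_to_natCast]
          exact (List.prefix_iff_eq_take.mp (List.takeWhile_prefix _)).symm
        have hpos : 0 < PySem.Chars.find (c :: r) [':'] := by
          rw [hfind, htw]
          simp only [List.length_cons]
          positivity
        simp only [bodyA, List.length_cons, Nat.zero_lt_succ, if_pos, hpos, hslice,
          hII, hsw, Bool.not_false, Bool.and_true]
        rw [if_pos (by rw [htw]; simp)]
  · have hfind : PySem.Chars.find t [':'] = -1 := by
      rw [find_single, if_neg hmem]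
    have hII : PySem.Chars.isIn [':'] t = false := by
      rw [PySem.Chars.isIn, hfind]
      simp
    simp [bodyA, hfind, hII]

theorem flatMap_if (P : List Char → Bool) (f : List Char → List Char) :
    ∀ (ts : List (List Char)),
    ts.flatMap (fun t => if P t then f t ++ ['\t'] else [])
      = ((ts.filter P).map f).flatMap (fun u => u ++ ['\t']) := by
  intro ts
  induction ts with
  | nil => simp
  | cons u ts ih => by_cases hu : P u <;> simp [hu, ih]

theorem joindatanum_empty (line : List Char) :
    LTsv_joindatanumChars line 0 (some []) =
      PySem.Chars.stripChars
        (((sp '\t' (PySem.Chars.replace line ['\n'] ['\t'])).filter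
            (fun t => decide (0 < t.length))).flatMap (fun t => '\t' :: t)) ['\t'] := by
  unfold LTsv_joindatanumChars
  have hrep : PySem.Chars.replace ([] : List Char) ['\n'] ['\t'] = [] := by
    rw [replace_single]; rfl
  simp only [hrep, splitOn_eq_sp, List.length_nil, lt_irrefl, if_false]
  have hfold := foldJ (sp '\t' (PySem.Chars.replace line ['\n'] ['\t'])) (0, [])
  rw [List.nil_append] at hfold
  congr 1
  split
  · rw [List.append_nil]; exact hfold
  · exact hfold

-- any string containing ':' is nonempty, so B's filter implies A's nonemptiness test
theorem P_imp_Q (t : List Char) :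
    ((PySem.Chars.isIn [':'] t && !PySem.Chars.startswith t [':'])
      && decide (0 < t.length))
    = (PySem.Chars.isIn [':'] t && !PySem.Chars.startswith t [':']) := by
  cases t with
  | nil =>
    have : PySem.Chars.isIn [':'] ([] : List Char) = false := by decide
    simp [this]
  | cons c r => simp

theorem chars_eq (line : List Char) : LTsv_unziplabelChars line = LTsv_unziplabel_altChars line := by
  have hnoNL : ∀ c ∈ PySem.Chars.replace line ['\n'] ['\t'], c ≠ '\n' := by
    intro c hc
    rw [replace_single] at hc
    obtain ⟨d, _, hd⟩ := List.mem_map.mp hc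
    intro he
    subst he
    by_cases hdn : d = '\n'
    · rw [if_pos hdn] at hd; exact absurd hd (by decide)
    · rw [if_neg hdn] at hd; exact hdn hd
  set r := PySem.Chars.replace line ['\n'] ['\t'] with hr
  set toks := sp '\t' r with htoks
  set ne := toks.filter (fun t => decide (0 < t.length)) with hne
  have hprops : ∀ t ∈ ne, t ≠ [] ∧ '\t' ∉ t := by
    intro t ht
    have hmem := List.mem_of_mem_filter ht
    have hlen : 0 < t.length := by simpa using List.of_mem_filter ht
    refine ⟨by intro he; simp [he] at hlen, ?_⟩
    intro hintab
    exact (sp_sound '\t' r t hmem '\t' hintab).2 rfl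
  have hpropsN : ∀ t ∈ ne, '\n' ∉ t := by
    intro t ht hintab
    have hmem := List.mem_of_mem_filter ht
    exact hnoNL _ (sp_sound '\t' r t hmem '\n' hintab).1 rfl
  unfold LTsv_unziplabelChars LTsv_unziplabel_altChars
  simp only [joindatanum_empty, splitOn_eq_sp, ← hr, ← htoks, ← hne]
  by_cases hne0 : ne = []
  · rw [hne0]
    have hA : PySem.Chars.stripChars (List.flatMap (fun t => '\t' :: t) []) ['\t'] = [] := by decide
    rw [hA]
    have hstrip : PySem.Chars.stripChars ([] : List Char) ['\n'] = [] := by decide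
    rw [hstrip]
    rw [show sp '\t' ([] : List Char) = [[]] from rfl]
    rw [foldLab]
    have hB : List.filter (fun t => PySem.Chars.isIn [':'] t && !PySem.Chars.startswith t [':']) toks = [] := by
      rw [List.filter_eq_nil_iff]
      intro t ht
      have hte : t = [] := by
        have h0 := List.filter_eq_nil_iff.mp hne0 t ht
        simp only [decide_eq_true_eq, Nat.not_lt, Nat.le_zero] at h0
        exact List.length_eq_zero_iff.mp h0
      subst hte
      decide
    rw [hB]
    simp [bodyA, rstripTab, PySem.Chars.join, List.intercalate]
  · rw [strip_flatMap_eq_intercalate ne hne0 hprops]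
    have hnoNLX : '\n' ∉ List.intercalate ['\t'] ne := by
      intro hm
      rcases mem_intercalate '\t' ne '\n' hm with h | ⟨t, ht, hc⟩
      · exact absurd h (by decide)
      · exact hpropsN t ht hc
    rw [stripChars_not_mem _ _ hnoNLX,
      sp_intercalate '\t' ne hne0 (fun t ht => (hprops t ht).2), foldLab]
    have hbody : List.flatMap bodyA ne
        = ((ne.filter (fun t => PySem.Chars.isIn [':'] t && !PySem.Chars.startswith t [':'])).map
            (fun t => t.takeWhile (fun c => !(c == ':')))).flatMap (fun u => u ++ ['\t']) := by
      rw [show bodyA = (fun t => if (PySem.Chars.isIn [':'] t && !PySem.Chars.startswith t [':'])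
          then (t.takeWhile (fun c => !(c == ':'))) ++ ['\t'] else []) from funext bodyA_eq]
      exact flatMap_if _ _ ne
    rw [List.nil_append, hbody]
    have hfilter : ne.filter (fun t => PySem.Chars.isIn [':'] t && !PySem.Chars.startswith t [':'])
        = toks.filter (fun t => PySem.Chars.isIn [':'] t && !PySem.Chars.startswith t [':']) := by
      rw [hne, List.filter_filter]
      exact List.filter_congr (fun t _ => P_imp_Q t)
    have hw : (fun t => (PySem.Chars.splitOnMax t [':'] 1).headD ([] : List Char))
        = fun t => t.takeWhile (fun c => !(c == ':')) := funext (headD_splitOnMax_one ':')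
    rw [hfilter, hw]
    set L := ((toks.filter (fun t => PySem.Chars.isIn [':'] t && !PySem.Chars.startswith t [':'])).map
        (fun t => t.takeWhile (fun c => !(c == ':')))) with hL
    have hLprops : ∀ l ∈ L, l ≠ [] ∧ '\t' ∉ l := by
      intro l hl
      obtain ⟨t, htf, rfl⟩ := List.mem_map.mp hl
      have hP := List.of_mem_filter htf
      have htoksmem := List.mem_of_mem_filter htf
      constructor
      · cases t with
        | nil => exact absurd hP (by decide)
        | cons c q =>
          have hsw : ¬ (PySem.Chars.startswith (c :: q) [':'] = true) := by
            intro hswt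
            rw [hswt] at hP
            simp at hP
          have hc : c ≠ ':' := by
            intro hce
            exact hsw (by simp [PySem.Chars.startswith, List.isPrefixOf, hce])
          simp [List.takeWhile, beq_false_of_ne hc]
      · intro hm
        have := (sp_sound '\t' r t htoksmem '\t'
          ((List.takeWhile_prefix _).subset hm)).2
        exact this rfl
    rw [rstrip_flatMap_eq_intercalate L hLprops]
    rfl

-- ===== VERDICT (by name: the statement is the Claim_ definition above) =====
theorem LTsv_unziplabel_spec : Claim_equal_LTsv_unziplabel := by
  intro s _
  unfold Spec_LTsv_unziplabel LTsv_unziplabel LTsv_unziplabel_alt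
  rw [chars_eq]
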